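-- pv_equiv track=rewrite | github.com/Amanmeena0/Data-Structure-and-Alogorithms | CodeChef/Starters 234 (DIv 4)/C.py | maximum_subsequence
-- ===== SOURCE A (Python) =====
-- def maximum_subsequence(Array):
--
--     positives = []
--     negatives = []
--
--     for num in Array:
--
--         if num >= 0:
--             positives.append(num)
--         else:
--             negatives.append(num)
--
--     total_sum = sum(positives)
--     count = len(positives)
--
--     negatives.sort(reverse=True)
--
--     for num in negatives:
--         if total_sum + num >= 0:
--             total_sum += num
--             count += 1
--         else:
--             break
--
--     return count
-- ===== SOURCE B (Python) =====
-- def maximum_subsequence(Array):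
--     total = 0
--     count = 0
--     for num in sorted(Array, reverse=True):
--         if total + num >= 0:
--             total += num
--             count += 1
--         else:
--             break
--     return count
-- ===== Notes on version B (the rewrite author's own statement) =====
-- stated objective: simpler
-- what changed: Replaces A's partition-into-positives/negatives plus separate sum/len/sort phases with one break-guarded greedy pass over the whole array sorted descending (and sorted() instead of in-place .sort()).
import Mathlib
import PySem

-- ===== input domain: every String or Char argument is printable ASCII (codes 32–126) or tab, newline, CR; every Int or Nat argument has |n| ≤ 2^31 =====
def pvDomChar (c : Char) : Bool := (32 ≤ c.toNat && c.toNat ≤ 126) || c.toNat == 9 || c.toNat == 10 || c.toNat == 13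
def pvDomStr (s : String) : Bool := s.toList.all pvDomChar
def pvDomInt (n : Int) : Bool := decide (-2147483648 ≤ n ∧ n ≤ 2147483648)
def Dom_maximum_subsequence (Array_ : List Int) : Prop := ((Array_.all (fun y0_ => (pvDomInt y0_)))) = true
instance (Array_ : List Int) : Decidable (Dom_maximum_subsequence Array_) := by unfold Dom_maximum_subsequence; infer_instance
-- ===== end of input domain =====

-- B changes the decomposition: one break-guarded greedy pass over the whole array sorted
-- descending, instead of A's partition + sum/len of positives + sort of negatives.

-- ===== PORT A =====
-- A's second loop: 'for num in negatives: if total_sum+num>=0: accumulate else: break; return count'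
def pvALoop : List Int → Int → Int → Int
  | [], _, count => count
  | num :: rest, total_sum, count =>
      if total_sum + num ≥ 0 then pvALoop rest (total_sum + num) (count + 1) else count

def maximum_subsequence (Array_ : List Int) : Int :=
  -- first loop: append each num to positives (num >= 0) or negatives
  let pn : List Int × List Int :=
    Array_.foldl (fun acc num =>
      if num ≥ 0 then (acc.1 ++ [num], acc.2) else (acc.1, acc.2 ++ [num])) ([], [])
  let positives := pn.1
  let negatives := pn.2
  let total_sum : Int := positives.sum
  let count : Int := (positives.length : Int)
  let negativesSorted := PySem.List.sorted negatives (fun x => x) true  -- negatives.sort(reverse=True)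
  pvALoop negativesSorted total_sum count

-- ===== PORT B =====
-- B's single loop: 'for num in sorted(Array, reverse=True): if total+num>=0: accumulate else: break'
def pvBLoop : List Int → Int → Int → Int
  | [], _, count => count
  | num :: rest, total, count =>
      if total + num ≥ 0 then pvBLoop rest (total + num) (count + 1) else count

def maximum_subsequence_alt (Array_ : List Int) : Int :=
  pvBLoop (PySem.List.sorted Array_ (fun x => x) true) 0 0

-- ===== PRECONDITION & SPEC =====
def Spec_maximum_subsequence (Array_ : List Int) (out : Int) : Prop := out = maximum_subsequence_alt Array_
instance (Array_ : List Int) (out : Int) : Decidable (Spec_maximum_subsequence Array_ out) := by unfold Spec_maximum_subsequence; infer_instance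

-- ===== CLAIM (what is proved, stated in full; the proofs are below) =====
def Claim_equal_maximum_subsequence : Prop := ∀ (Array_ : List Int), Dom_maximum_subsequence Array_ → Spec_maximum_subsequence Array_ (maximum_subsequence Array_)

-- ===== LEMMAS AND PROOFS =====

-- A's partition loop computes the two filters of the input.
theorem pvPartition_eq (Array_ : List Int) (p n : List Int) :
    Array_.foldl (fun (acc : List Int × List Int) num =>
      if num ≥ 0 then (acc.1 ++ [num], acc.2) else (acc.1, acc.2 ++ [num])) (p, n)
    = (p ++ Array_.filter (fun x => 0 ≤ x), n ++ Array_.filter (fun x => x < 0)) := by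
  induction Array_ generalizing p n with
  | nil => simp
  | cons a t ih =>
      by_cases ha : a ≥ 0 <;>
        simp [List.foldl_cons, ha, ih, List.filter_cons,
          show ¬ a < 0 ↔ (0 ≤ a) from by omega]

-- the two loops are the same recursion
theorem pvBLoop_eq_pvALoop (l : List Int) (t c : Int) : pvBLoop l t c = pvALoop l t c := by
  induction l generalizing t c with
  | nil => rfl
  | cons x r ih => simp only [pvBLoop, pvALoop]; split_ifs <;> simp [ih]

-- running the greedy loop over nonnegative elements first just accumulates their sum and count
theorem pvBLoop_nonneg_prefix (P N : List Int) (t c : Int)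
    (ht : 0 ≤ t) (hP : ∀ x ∈ P, 0 ≤ x) :
    pvBLoop (P ++ N) t c = pvALoop N (t + P.sum) (c + (P.length : Int)) := by
  induction P generalizing t c with
  | nil => simpa using pvBLoop_eq_pvALoop N t c
  | cons p P' ih =>
      have hp : 0 ≤ p := hP p (by simp)
      have hcond : t + p ≥ 0 := by omega
      simp only [List.cons_append, pvBLoop, if_pos hcond]
      rw [ih (t + p) (c + 1) (by omega) (fun x hx => hP x (by simp [hx]))]
      congr 1
      · simp [List.sum_cons]; ring
      · push_cast [List.length_cons]; ring

-- descending sort of the whole list = descending sort of nonnegatives ++ descending sort of negatives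
theorem pvSorted_split (Array_ : List Int) :
    PySem.List.sorted Array_ (fun x => x) true
      = PySem.List.sorted (Array_.filter (fun x => 0 ≤ x)) (fun x => x) true
        ++ PySem.List.sorted (Array_.filter (fun x => x < 0)) (fun x => x) true := by
  have hfilt : (fun x : Int => decide (x < 0)) = (fun x : Int => !decide (0 ≤ x)) := by
    funext x; simp only [Bool.eq_not_iff, ne_eq, decide_eq_decide]; omega
  apply List.Perm.eq_of_pairwise (le := fun a b : Int => b ≤ a)
  · exact fun a b _ _ h1 h2 => le_antisymm h2 h1
  · exact PySem.List.sorted_pairwise_rev ..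
  · rw [List.pairwise_append]
    refine ⟨PySem.List.sorted_pairwise_rev .., PySem.List.sorted_pairwise_rev .., ?_⟩
    intro x hx y hy
    have hx' : 0 ≤ x := by
      have := (PySem.List.mem_sorted ..).mp hx
      simpa using (List.mem_filter.mp this).2
    have hy' : y < 0 := by
      have := (PySem.List.mem_sorted ..).mp hy
      simpa using (List.mem_filter.mp this).2
    omega
  · have hp : (List.filter (fun x => decide (0 ≤ x)) Array_
        ++ List.filter (fun x => decide (x < 0)) Array_).Perm Array_ := by
      rw [hfilt]; exact List.filter_append_perm _ _
    exact (PySem.List.sorted_perm ..).trans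
      (((PySem.List.sorted_perm ..).append (PySem.List.sorted_perm ..)).trans hp).symm

-- ===== VERDICT (by name: the statement is the Claim_ definition above) =====
theorem maximum_subsequence_spec : Claim_equal_maximum_subsequence := by
  intro Array_ _
  unfold Spec_maximum_subsequence maximum_subsequence maximum_subsequence_alt
  rw [pvPartition_eq, pvSorted_split]
  simp only [List.nil_append]
  rw [pvBLoop_nonneg_prefix _ _ 0 0 le_rfl
        (fun x hx => by
          have := (PySem.List.mem_sorted ..).mp hx
          simpa using (List.mem_filter.mp this).2)]
  rw [List.Perm.sum_eq (PySem.List.sorted_perm ..), (PySem.List.sorted_perm ..).length_eq]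
  simp
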